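-- pv_equiv track=rewrite | github.com/Jass2345/ASCII_Chess | ascii_chess/renderer.py | _moves_to_text
-- ===== SOURCE A (Python) =====
-- from typing import Iterable, List
--
-- def _moves_to_text(moves: Iterable[str]) -> str:
--     lines = ["Moves (White/Black):"]
--     move_pairs = []
--     moves_list = list(moves)
--     for idx in range(0, len(moves_list), 2):
--         white = moves_list[idx]
--         black = moves_list[idx + 1] if idx + 1 < len(moves_list) else ""
--         move_pairs.append(f"{idx // 2 + 1:>2}. {white:<7} {black:<7}")
--     lines.extend(move_pairs if move_pairs else ["<no moves yet>"])
--     return "\n".join(lines)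
-- ===== SOURCE B (Python) =====
-- def _moves_to_text(moves):
--     it = iter(moves)
--     rows = []
--     for n, white in enumerate(it, start=1):
--         black = next(it, "")
--         rows.append(f"{n:>2}. {white:<7} {black:<7}")
--     if not rows:
--         rows = ["<no moves yet>"]
--     return "\n".join(["Moves (White/Black):"] + rows)
-- ===== Notes on version B (the rewrite author's own statement) =====
-- stated objective: idiomatic
-- what changed: Replaces A's range(0, len, 2) index loop with idx//2+1 numbering and an inline bounds guard by pairing the moves directly from a single iterator (enumerate for the move number, next(it, '') for the optional black move), so no index arithmetic or length checks remain.
import Mathlib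
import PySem

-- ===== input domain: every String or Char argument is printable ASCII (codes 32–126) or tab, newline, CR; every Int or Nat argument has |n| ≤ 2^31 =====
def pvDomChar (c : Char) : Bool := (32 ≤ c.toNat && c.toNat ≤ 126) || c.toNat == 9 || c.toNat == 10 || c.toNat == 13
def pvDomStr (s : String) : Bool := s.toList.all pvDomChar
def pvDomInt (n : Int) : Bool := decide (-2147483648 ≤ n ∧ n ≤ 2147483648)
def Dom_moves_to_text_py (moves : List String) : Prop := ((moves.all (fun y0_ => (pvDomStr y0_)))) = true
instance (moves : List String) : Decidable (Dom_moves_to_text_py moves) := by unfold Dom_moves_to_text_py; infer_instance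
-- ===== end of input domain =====

-- B pairs the moves by consuming the list two at a time with an explicit pair counter instead of
-- A's step-2 index loop with idx//2+1 numbering and an inline bounds guard; same output, more idiomatic.

-- shared rendering of the identical f-string  f"{n:>2}. {white:<7} {black:<7}"  of both Pythons
def fmtRow (n : Int) (w b : String) : String :=
  let ns := (PySem.Int.toStr n).toList
  String.ofList ((List.replicate (2 - ns.length) ' ' ++ ns)
    ++ ('.' :: ' ' :: (w.toList ++ List.replicate (7 - w.toList.length) ' '))
    ++ (' ' :: (b.toList ++ List.replicate (7 - b.toList.length) ' ')))

-- ===== PORT A =====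
def moves_to_text_py (moves : List String) : String :=
  let lines : List String := ["Moves (White/Black):"]
  let moves_list := moves
  let move_pairs : List String :=
    (PySem.List.pyRange 0 (moves_list.length : Int) 2).foldl
      (fun acc idx =>
        let white := PySem.List.pyGetD moves_list idx ""
        let black := if idx + 1 < (moves_list.length : Int)
                     then PySem.List.pyGetD moves_list (idx + 1) "" else ""
        acc ++ [fmtRow (PySem.Int.floordiv idx 2 + 1) white black]) []
  PySem.Str.join "\n" (lines ++ (if move_pairs = [] then ["<no moves yet>"] else move_pairs))

-- ===== PORT B =====
-- B's loop: take the next white move, pull the paired black move (or "") off the same stream,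
-- with n the running move number (enumerate(it, start=1))
def altRows (n : Int) : List String → List String
  | [] => []
  | [w] => [fmtRow n w ""]
  | w :: b :: rest => fmtRow n w b :: altRows (n + 1) rest

def moves_to_text_py_alt (moves : List String) : String :=
  let rows := altRows 1 moves
  PySem.Str.join "\n" ("Moves (White/Black):" :: (if rows = [] then ["<no moves yet>"] else rows))

-- ===== PRECONDITION & SPEC =====
def Spec_moves_to_text_py (moves : List String) (out : String) : Prop := out = moves_to_text_py_alt moves
instance (moves : List String) (out : String) : Decidable (Spec_moves_to_text_py moves out) := by unfold Spec_moves_to_text_py; infer_instance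

-- ===== CLAIM (what is proved, stated in full; the proofs are below) =====
def Claim_equal_moves_to_text_py : Prop := ∀ (moves : List String), Dom_moves_to_text_py moves → Spec_moves_to_text_py moves (moves_to_text_py moves)

-- ===== LEMMAS AND PROOFS =====

theorem pyRange_two (m : Nat) :
    PySem.List.pyRange 0 (m : Int) 2 = (List.range ((m + 1) / 2)).map (fun (k : Nat) => (2 * k : Int)) := by
  rw [PySem.List.pyRange_of_pos 0 (m : Int) (by norm_num)]
  have hn : (if (0:Int) < (m:Int) then (((m:Int) - 0 + 2 - 1) / 2).toNat else 0) = (m + 1) / 2 := by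
    split_ifs with h <;> omega
  rw [hn]
  exact List.map_congr_left (fun k _ => by ring)

theorem pyRange_two_cons (m : Nat) :
    PySem.List.pyRange 0 ((m : Nat) + 2 : Int) 2
      = 0 :: (PySem.List.pyRange 0 (m : Int) 2).map (· + 2) := by
  have h2 : ((m : Nat) + 2 : Int) = ((m + 2 : Nat) : Int) := by push_cast; ring
  rw [h2, pyRange_two, pyRange_two, show (m + 2 + 1) / 2 = (m + 1) / 2 + 1 by omega,
      List.range_succ_eq_map, List.map_cons, List.map_map, List.map_map]
  norm_num
  exact fun a _ => by ring

theorem pyGetD_zero {α : Type} (x : α) (l : List α) (d : α) :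
    PySem.List.pyGetD (x :: l) 0 d = x := by
  simp [PySem.List.pyGetD, PySem.List.pyGet?, PySem.List.pyIdx?]

theorem pyGetD_one {α : Type} (x y : α) (l : List α) (d : α) :
    PySem.List.pyGetD (x :: y :: l) (0 + 1) d = y := by
  norm_num [PySem.List.pyGetD, PySem.List.pyGet?, PySem.List.pyIdx?]

theorem pyGetD_cons_cons {α : Type} (x y : α) (l : List α) (j : Int) (d : α) (hj : 0 ≤ j) :
    PySem.List.pyGetD (x :: y :: l) (j + 2) d = PySem.List.pyGetD l j d := by
  simp only [PySem.List.pyGetD, PySem.List.pyGet?, PySem.List.pyIdx?]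
  have h0 : (0:Int) ≤ j + 2 := by omega
  by_cases h : j < (l.length : Int)
  · have h' : j + 2 < ((x :: y :: l).length : Int) := by simp; omega
    simp only [if_pos hj, if_pos h0, if_pos h, if_pos h']
    have ht : (j + 2).toNat = j.toNat + 2 := by omega
    simp [ht]
  · have h' : ¬ j + 2 < ((x :: y :: l).length : Int) := by simp; omega
    simp only [if_pos hj, if_pos h0, if_neg h, if_neg h']
    simp

set_option maxHeartbeats 1000000 in
theorem key : ∀ (ms : List String) (n : Int) (acc : List String),
    (PySem.List.pyRange 0 (ms.length : Int) 2).foldl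
      (fun acc idx =>
        acc ++ [fmtRow (PySem.Int.floordiv idx 2 + n)
          (PySem.List.pyGetD ms idx "")
          (if idx + 1 < (ms.length : Int) then PySem.List.pyGetD ms (idx + 1) "" else "")]) acc
      = acc ++ altRows n ms
  | [], n, acc => by
      have h0 : PySem.List.pyRange 0 ((List.length ([] : List String)) : Int) 2 = [] := by
        rw [show ((List.length ([] : List String)) : Int) = ((0:Nat) : Int) by simp, pyRange_two]
        simp
      rw [h0]
      simp [altRows]
  | [w], n, acc => by
      have h1 : PySem.List.pyRange 0 ((List.length [w]) : Int) 2 = [0] := by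
        rw [show ((List.length [w]) : Int) = ((1:Nat) : Int) by simp, pyRange_two]
        simp
      rw [h1, List.foldl_cons, List.foldl_nil]
      have hd0 : PySem.Int.floordiv 0 2 = 0 := by decide
      have hc : ¬ ((0:Int) + 1 < ((List.length [w]) : Int)) := by simp
      rw [hd0, pyGetD_zero, if_neg hc]
      simp [altRows]
  | w :: b :: rest, n, acc => by
      have hlen : ((w :: b :: rest).length : Int) = ((rest.length : Nat) : Int) + 2 := by
        simp; ring
      rw [hlen, pyRange_two_cons, List.foldl_cons, List.foldl_map]
      have hd0 : PySem.Int.floordiv 0 2 = 0 := by decide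
      have hcond : ((0:Int) + 1 < (rest.length : Int) + 2) := by omega
      rw [hd0, pyGetD_zero, if_pos hcond, pyGetD_one, zero_add]
      refine Eq.trans (PySem.List.foldl_congr_mem _ _
        (fun acc j =>
          acc ++ [fmtRow (PySem.Int.floordiv j 2 + (n + 1))
            (PySem.List.pyGetD rest j "")
            (if j + 1 < (rest.length : Int) then PySem.List.pyGetD rest (j + 1) "" else "")]) _ ?_) ?_
      · intro acc2 j hj
        have hj0 : 0 ≤ j := ((PySem.List.mem_pyRange_iff_of_pos (by norm_num) j).mp hj).1
        have hfd : PySem.Int.floordiv (j + 2) 2 = PySem.Int.floordiv j 2 + 1 := by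
          simp only [PySem.Int.floordiv, Int.fdiv_eq_ediv]
          omega
        have hgw := pyGetD_cons_cons w b rest j "" hj0
        have hif : (if j + 2 + 1 < (rest.length : Int) + 2
              then PySem.List.pyGetD (w :: b :: rest) (j + 2 + 1) "" else "")
            = (if j + 1 < (rest.length : Int)
              then PySem.List.pyGetD rest (j + 1) "" else "") := by
          by_cases hc : j + 1 < (rest.length : Int)
          · rw [if_pos (show j + 2 + 1 < (rest.length : Int) + 2 by omega), if_pos hc,
              show j + 2 + 1 = (j + 1) + 2 by ring, pyGetD_cons_cons w b rest (j + 1) "" (by omega)]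
          · rw [if_neg (show ¬ j + 2 + 1 < (rest.length : Int) + 2 by omega), if_neg hc]
        rw [hgw, hif, hfd, show PySem.Int.floordiv j 2 + 1 + n = PySem.Int.floordiv j 2 + (n + 1) by ring]
      · rw [key rest (n + 1) (acc ++ [fmtRow n w b])]
        simp [altRows]


-- ===== VERDICT (by name: the statement is the Claim_ definition above) =====
theorem moves_to_text_py_spec : Claim_equal_moves_to_text_py := by
  intro moves _
  unfold Spec_moves_to_text_py
  simp only [moves_to_text_py, moves_to_text_py_alt]
  rw [key moves 1 []]
  simp
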